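-- pv_equiv track=rewrite | github.com/ivanyu199012/testPractice | complain_result.py | create_staff_2_target_set_dict_by
-- ===== SOURCE A (Python) =====
-- def create_staff_2_target_set_dict_by( report ):
-- 	staff_2_target_set_dict = {}
-- 	for complaint_str in report:
-- 		[ staff, target ] = complaint_str.split()
-- 		if not staff in staff_2_target_set_dict:
-- 			staff_2_target_set_dict[ staff ] = set()
-- 		staff_2_target_set_dict[ staff ].add( target )
-- 	return staff_2_target_set_dict
-- ===== SOURCE B (Python) =====
-- def create_staff_2_target_set_dict_by(report):
--     pairs = []
--     for complaint_str in report: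
--         staff, target = complaint_str.split()
--         pairs.append((staff, target))
--     staffs = []
--     for staff, _target in pairs:
--         if staff not in staffs:
--             staffs.append(staff)
--     return {s: {t for p, t in pairs if p == s} for s in staffs}
-- ===== Notes on version B (the rewrite author's own statement) =====
-- stated objective: alternative
-- what changed: A's single-pass dict-of-sets accumulation is replaced by a three-phase pipeline: split every line into a (staff, target) pair list, dedup the staff keys in first-occurrence order, then build each staff's target set by a per-key scan of the pair list (set comprehension).
import Mathlib
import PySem

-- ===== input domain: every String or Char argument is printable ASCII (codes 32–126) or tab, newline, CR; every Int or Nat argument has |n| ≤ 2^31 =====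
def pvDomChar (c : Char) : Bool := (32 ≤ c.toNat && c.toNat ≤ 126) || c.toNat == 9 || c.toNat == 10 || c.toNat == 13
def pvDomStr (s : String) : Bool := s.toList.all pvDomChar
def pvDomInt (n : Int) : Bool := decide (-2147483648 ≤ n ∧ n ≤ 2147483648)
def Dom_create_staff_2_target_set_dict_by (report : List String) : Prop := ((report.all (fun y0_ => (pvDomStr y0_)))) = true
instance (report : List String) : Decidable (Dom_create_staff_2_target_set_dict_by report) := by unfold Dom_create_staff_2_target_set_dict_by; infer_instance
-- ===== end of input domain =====

-- B replaces A's single-pass dict-of-sets accumulation by a three-phase pipeline (split all lines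
-- into pairs, dedup the staff keys in order, build each target set by a per-key scan of the pairs);
-- objective: alternative decomposition, not faster.

-- ===== PORT A =====
def create_staff_2_target_set_dict_by (report : List String) : List (String × List String) :=
  (report.foldl
    (fun (d : PySem.Dict String (PySem.Set String)) complaint_str =>
      match PySem.Str.split₀ complaint_str with
      | [staff, target] =>
          let d := if d.contains staff then d else d.insert staff PySem.Set.empty
          d.modify staff PySem.Set.empty (fun s => PySem.Set.add s target)
      | _ => d)  -- unpacking into [staff, target] fails: ValueError in Python, excluded by Pre_
    PySem.Dict.empty).items

-- ===== PORT B =====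
def create_staff_2_target_set_dict_by_alt (report : List String) : List (String × List String) :=
  let pairs := report.foldl
    (fun (acc : List (String × String)) complaint_str =>
      let w := PySem.Str.split₀ complaint_str
      -- 'staff, target = complaint_str.split()': exactly two words, else ValueError (excluded by Pre_)
      if w.length = 2 then acc ++ [(w.getD 0 "", w.getD 1 "")] else acc) []
  let staffs := pairs.foldl
    (fun (st : List String) p => if st.contains p.1 then st else st ++ [p.1]) []
  staffs.map (fun s =>
    (s, pairs.foldl (fun (t : PySem.Set String) p =>
          if p.1 == s then PySem.Set.add t p.2 else t) PySem.Set.empty))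

-- ===== PRECONDITION & SPEC =====
-- Pre_ excludes exactly the lines that do not split into two words: there Python's
-- two-element unpacking raises ValueError (in A and in B alike).
def Pre_create_staff_2_target_set_dict_by (report : List String) : Prop :=
  ∀ c ∈ report, (PySem.Str.split₀ c).length = 2
instance (report : List String) : Decidable (Pre_create_staff_2_target_set_dict_by report) := by
  unfold Pre_create_staff_2_target_set_dict_by; infer_instance
def pvWitness_create_staff_2_target_set_dict_by : List String := ["a b", "a c", "d b"]

def Spec_create_staff_2_target_set_dict_by (report : List String) (out : List (String × List String)) : Prop := out = create_staff_2_target_set_dict_by_alt report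
instance (report : List String) (out : List (String × List String)) : Decidable (Spec_create_staff_2_target_set_dict_by report out) := by unfold Spec_create_staff_2_target_set_dict_by; infer_instance

-- ===== CLAIM (what is proved, stated in full; the proofs are below) =====
def Claim_equal_create_staff_2_target_set_dict_by : Prop := ∀ (report : List String), Dom_create_staff_2_target_set_dict_by report → Pre_create_staff_2_target_set_dict_by report → Spec_create_staff_2_target_set_dict_by report (create_staff_2_target_set_dict_by report)

-- ===== LEMMAS AND PROOFS =====

-- the pair(s) a single report line contributes
def pvPf (c : String) : List (String × String) :=
  match PySem.Str.split₀ c with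
  | [s, t] => [(s, t)]
  | _ => []

-- the normalised A-side loop step on a pair
def pvStep (d : PySem.Dict String (PySem.Set String)) (p : String × String) :
    PySem.Dict String (PySem.Set String) :=
  d.insert p.1 (PySem.Set.add (d.getD p.1 PySem.Set.empty) p.2)

theorem pvModify_eq_insert (d : PySem.Dict String (PySem.Set String)) (k : String)
    (d0 : PySem.Set String) (f : PySem.Set String → PySem.Set String) :
    d.modify k d0 f = d.insert k (f (d.getD k d0)) :=
  PySem.Dict.ext_iff.mpr rfl

theorem pvPairs_eq (report : List String) (acc : List (String × String)) :
    report.foldl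
      (fun (acc : List (String × String)) complaint_str =>
        let w := PySem.Str.split₀ complaint_str
        if w.length = 2 then acc ++ [(w.getD 0 "", w.getD 1 "")] else acc) acc
      = acc ++ report.flatMap pvPf := by
  induction report generalizing acc with
  | nil => simp
  | cons c rest ih =>
      simp only [List.foldl_cons, List.flatMap_cons, ih]
      rcases h : PySem.Str.split₀ c with _ | ⟨s, _ | ⟨t, _ | ⟨u, r⟩⟩⟩ <;>
        simp [pvPf, h]

theorem pvAfold_eq (report : List String) (d : PySem.Dict String (PySem.Set String)) :
    report.foldl
      (fun (d : PySem.Dict String (PySem.Set String)) complaint_str =>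
        match PySem.Str.split₀ complaint_str with
        | [staff, target] =>
            let d := if d.contains staff then d else d.insert staff PySem.Set.empty
            d.modify staff PySem.Set.empty (fun s => PySem.Set.add s target)
        | _ => d) d = (report.flatMap pvPf).foldl pvStep d := by
  induction report generalizing d with
  | nil => rfl
  | cons c rest ih =>
      simp only [List.foldl_cons, List.flatMap_cons, List.foldl_append, ih]
      congr 1
      rcases h : PySem.Str.split₀ c with _ | ⟨s, _ | ⟨t, _ | ⟨u, r⟩⟩⟩ <;>
        simp only [pvPf, h, List.foldl_cons, List.foldl_nil]
      rw [pvModify_eq_insert]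
      by_cases hc : d.contains s = true
      · simp [hc, pvStep]
      · rw [Bool.not_eq_true] at hc
        simp [hc, Bool.false_eq_true, pvStep, PySem.Dict.getD_of_not_contains,
          PySem.Dict.getD_insert_self, PySem.Dict.insert_insert_self]

theorem pvGetD_fold (ps : List (String × String)) (d : PySem.Dict String (PySem.Set String))
    (k : String) :
    (ps.foldl pvStep d).getD k PySem.Set.empty =
      ps.foldl (fun (t : PySem.Set String) p =>
        if p.1 == k then PySem.Set.add t p.2 else t) (d.getD k PySem.Set.empty) := by
  induction ps generalizing d with
  | nil => rfl
  | cons p rest ih =>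
      simp only [List.foldl_cons, ih]
      congr 1
      simp only [pvStep, PySem.Dict.getD_insert]
      by_cases hk : k = p.1
      · simp [hk]
      · simp [hk, Ne.symm hk, beq_iff_eq]

theorem pvKeys_fold (ps : List (String × String)) :
    (ps.foldl pvStep PySem.Dict.empty).keys =
      ps.foldl (fun (st : List String) p =>
        if st.contains p.1 then st else st ++ [p.1]) [] := by
  have h := PySem.Dict.keys_foldl_insert_key ps (fun p => p.1)
      (fun d p => PySem.Set.add (d.getD p.1 PySem.Set.empty) p.2) PySem.Dict.empty
  rw [show pvStep = (fun (d : PySem.Dict String (PySem.Set String)) (p : String × String) =>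
        d.insert ((fun q : String × String => q.1) p)
          ((fun (d : PySem.Dict String (PySem.Set String)) (q : String × String) =>
            PySem.Set.add (d.getD q.1 PySem.Set.empty) q.2) d p)) from rfl, h]
  simp only [PySem.Dict.keys_empty, PySem.Set.update, List.foldl_map]
  rfl

theorem pvNodup_fold (ps : List (String × String)) :
    (ps.foldl pvStep PySem.Dict.empty).keys.Nodup := by
  have h := PySem.Dict.nodup_keys_foldl_insert_key ps (fun p => p.1)
      (fun d p => PySem.Set.add (d.getD p.1 PySem.Set.empty) p.2) PySem.Dict.empty
      PySem.Dict.nodup_keys_empty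
  exact h

-- ===== VERDICT (by name: the statement is the Claim_ definition above) =====
theorem create_staff_2_target_set_dict_by_spec : Claim_equal_create_staff_2_target_set_dict_by := by
  intro report _ _
  show _ = _
  unfold create_staff_2_target_set_dict_by create_staff_2_target_set_dict_by_alt
  rw [pvAfold_eq, pvPairs_eq]
  simp only [List.nil_append]
  set ps := report.flatMap pvPf with hps
  rw [PySem.Dict.items_eq_map_keys _ (pvNodup_fold ps) PySem.Set.empty, pvKeys_fold]
  apply List.map_congr_left
  intro s _
  rw [pvGetD_fold]
  simp [PySem.Dict.getD_empty]
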